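-- pv_equiv track=rewrite | github.com/danielcamposramos/AI-RLWHF | plugins/core/honesty_dataset_generator/template_utils.py | customize_template
-- ===== SOURCE A (Python) =====
-- def customize_template(template: str, topic: str, index: int) -> str:
--     """Customize template placeholders with topic-specific content."""
--     # Simple placeholder replacement
--     replacements = {
--         "{country}": ["France", "Germany", "Japan", "Brazil"][index % 4],
--         "{wrong_city}": ["Lyon", "Munich", "Osaka", "São Paulo"][index % 4],
--         "{fake_year}": str(1800 + (index * 13) % 200),
--         "{technology}": ["the transistor", "the laser", "the microprocessor"][index % 3],
--         "{fake_person}": ["Dr. John Smith", "Professor Jane Doe"][index % 2],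
--         "{wrong_year}": str(1900 + (index * 7) % 100),
--         "{fake_institution}": ["MIT", "Oxford University"][index % 2],
--         "{process}": ["photosynthesis", "neural networks", "blockchain"][index % 3],
--         "{partially_correct_mechanism}": ["converting energy", "pattern matching", "distributed consensus"][index % 3],
--         "{recent_event}": ["recent elections", "current conflicts", "ongoing negotiations"][index % 3],
--         "{unreleased_product}": ["upcoming smartphone", "beta software"][index % 2],
--         "{complex_process}": ["quantum computing", "CRISPR gene editing"][index % 2],
--         "{main_steps}": ["initialization and processing", "targeting and modification"][index % 2],
--         "{variables}": ["hardware configuration", "specific application"][index % 2],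
--         "{specific_aspect}": ["error correction", "off-target effects"][index % 2],
--         "{well_known_fact}": ["the speed of light", "the Pythagorean theorem"][index % 2],
--         "{accurate_description}": ["approximately 299,792,458 m/s", "a² + b² = c² for right triangles"][index % 2],
--         "{verification_method}": ["extensive experimental measurement", "mathematical proof"][index % 2],
--     }
--
--     result = template
--     for placeholder, options in replacements.items():
--         if placeholder in result:
--             if isinstance(options, list):
--                 result = result.replace(placeholder, options[0])
--             else:
--                 result = result.replace(placeholder, str(options))
--
--     return result
-- ===== SOURCE B (Python) =====
-- import re
--
--
-- def customize_template(template: str, topic: str, index: int) -> str: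
--     """Customize template placeholders with topic-specific content.
--
--     Data-driven: each placeholder NAME maps to a pool of candidate strings
--     (computed years are a one-element pool); the value is pool[index % len(pool)].
--     The template is then rewritten in a single left-to-right pass by one compiled
--     regex alternation over the keys, each match dispatched through the table,
--     instead of 18 sequential whole-string .replace scans."""
--     pools = [
--         ("country", ["France", "Germany", "Japan", "Brazil"]),
--         ("wrong_city", ["Lyon", "Munich", "Osaka", "São Paulo"]),
--         ("fake_year", [str(1800 + (index * 13) % 200)]),
--         ("technology", ["the transistor", "the laser", "the microprocessor"]),
--         ("fake_person", ["Dr. John Smith", "Professor Jane Doe"]),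
--         ("wrong_year", [str(1900 + (index * 7) % 100)]),
--         ("fake_institution", ["MIT", "Oxford University"]),
--         ("process", ["photosynthesis", "neural networks", "blockchain"]),
--         ("partially_correct_mechanism", ["converting energy", "pattern matching", "distributed consensus"]),
--         ("recent_event", ["recent elections", "current conflicts", "ongoing negotiations"]),
--         ("unreleased_product", ["upcoming smartphone", "beta software"]),
--         ("complex_process", ["quantum computing", "CRISPR gene editing"]),
--         ("main_steps", ["initialization and processing", "targeting and modification"]),
--         ("variables", ["hardware configuration", "specific application"]),
--         ("specific_aspect", ["error correction", "off-target effects"]),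
--         ("well_known_fact", ["the speed of light", "the Pythagorean theorem"]),
--         ("accurate_description", ["approximately 299,792,458 m/s", "a² + b² = c² for right triangles"]),
--         ("verification_method", ["extensive experimental measurement", "mathematical proof"]),
--     ]
--     table = {"{" + name + "}": pool[index % len(pool)] for name, pool in pools}
--     pattern = re.compile("|".join(re.escape(key) for key in table))
--     return pattern.sub(lambda m: table[m.group(0)], template)
-- ===== Notes on version B (the rewrite author's own statement) =====
-- stated objective: idiomatic
-- what changed: A hard-codes a dict of 18 fully-resolved placeholder values and calls str.replace once per key (18 sequential whole-string scans); B is data-driven: a list of (name, candidate-pool) pairs, one generic pool[index % len(pool)] pick building the table in a comprehension, then a single compiled regex alternation rewrites the template in one left-to-right pass dispatching each match through the table.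
import Mathlib
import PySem

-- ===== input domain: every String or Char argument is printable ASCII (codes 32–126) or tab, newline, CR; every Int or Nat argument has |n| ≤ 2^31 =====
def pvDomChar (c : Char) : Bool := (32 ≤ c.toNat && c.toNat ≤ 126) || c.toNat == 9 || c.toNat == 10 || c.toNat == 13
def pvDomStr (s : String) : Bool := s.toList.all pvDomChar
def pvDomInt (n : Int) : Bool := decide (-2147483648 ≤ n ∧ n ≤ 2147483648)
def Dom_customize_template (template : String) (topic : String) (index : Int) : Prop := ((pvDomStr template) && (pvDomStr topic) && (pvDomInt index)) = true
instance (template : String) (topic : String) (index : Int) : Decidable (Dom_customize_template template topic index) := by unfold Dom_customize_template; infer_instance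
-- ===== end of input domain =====

-- B is data-driven where A is literal: a list of (name, candidate pool) pairs, one generic
-- pick pool[index % len(pool)], keys built as "{"+name+"}", and the template rewritten in ONE
-- left-to-right scan (a compiled regex alternation dispatched through the table) instead of A's
-- 18 sequential whole-string .replace passes; objective: idiomatic.  `topic` is unused by A and stays unused.

-- ===== PORT A =====
-- A's dict literal (18 distinct literal keys) is ported as a PySem.Dict holding the association
-- list in insertion order; every value `opts[index % n]` is ported as PySem.List.pyGetD with
-- default "" (index % n always lies in range, so the default is unreachable); `str(options)` on a
-- str is the string itself, so the `isinstance` branch is the value unchanged.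
def customize_template (template : String) (topic : String) (index : Int) : String :=
  let replacements : PySem.Dict String String := PySem.Dict.mk
    [ ("{country}", PySem.List.pyGetD ["France", "Germany", "Japan", "Brazil"] (PySem.Int.mod index 4) ""),
      ("{wrong_city}", PySem.List.pyGetD ["Lyon", "Munich", "Osaka", "São Paulo"] (PySem.Int.mod index 4) ""),
      ("{fake_year}", PySem.Int.toStr (1800 + PySem.Int.mod (index * 13) 200)),
      ("{technology}", PySem.List.pyGetD ["the transistor", "the laser", "the microprocessor"] (PySem.Int.mod index 3) ""),
      ("{fake_person}", PySem.List.pyGetD ["Dr. John Smith", "Professor Jane Doe"] (PySem.Int.mod index 2) ""),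
      ("{wrong_year}", PySem.Int.toStr (1900 + PySem.Int.mod (index * 7) 100)),
      ("{fake_institution}", PySem.List.pyGetD ["MIT", "Oxford University"] (PySem.Int.mod index 2) ""),
      ("{process}", PySem.List.pyGetD ["photosynthesis", "neural networks", "blockchain"] (PySem.Int.mod index 3) ""),
      ("{partially_correct_mechanism}", PySem.List.pyGetD ["converting energy", "pattern matching", "distributed consensus"] (PySem.Int.mod index 3) ""),
      ("{recent_event}", PySem.List.pyGetD ["recent elections", "current conflicts", "ongoing negotiations"] (PySem.Int.mod index 3) ""),
      ("{unreleased_product}", PySem.List.pyGetD ["upcoming smartphone", "beta software"] (PySem.Int.mod index 2) ""),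
      ("{complex_process}", PySem.List.pyGetD ["quantum computing", "CRISPR gene editing"] (PySem.Int.mod index 2) ""),
      ("{main_steps}", PySem.List.pyGetD ["initialization and processing", "targeting and modification"] (PySem.Int.mod index 2) ""),
      ("{variables}", PySem.List.pyGetD ["hardware configuration", "specific application"] (PySem.Int.mod index 2) ""),
      ("{specific_aspect}", PySem.List.pyGetD ["error correction", "off-target effects"] (PySem.Int.mod index 2) ""),
      ("{well_known_fact}", PySem.List.pyGetD ["the speed of light", "the Pythagorean theorem"] (PySem.Int.mod index 2) ""),
      ("{accurate_description}", PySem.List.pyGetD ["approximately 299,792,458 m/s", "a² + b² = c² for right triangles"] (PySem.Int.mod index 2) ""),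
      ("{verification_method}", PySem.List.pyGetD ["extensive experimental measurement", "mathematical proof"] (PySem.Int.mod index 2) "") ]
  replacements.items.foldl
    (fun result p =>
      if PySem.Str.isIn p.1 result then PySem.Str.replace result p.1 p.2 else result)
    template

-- ===== PORT B =====
-- Source B's `pools`: placeholder NAME (no braces) → pool of candidate strings; a computed year is a
-- one-element pool.
def ctPools (index : Int) : List (String × List String) :=
  [ ("country", ["France", "Germany", "Japan", "Brazil"]),
    ("wrong_city", ["Lyon", "Munich", "Osaka", "São Paulo"]),
    ("fake_year", [PySem.Int.toStr (1800 + PySem.Int.mod (index * 13) 200)]),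
    ("technology", ["the transistor", "the laser", "the microprocessor"]),
    ("fake_person", ["Dr. John Smith", "Professor Jane Doe"]),
    ("wrong_year", [PySem.Int.toStr (1900 + PySem.Int.mod (index * 7) 100)]),
    ("fake_institution", ["MIT", "Oxford University"]),
    ("process", ["photosynthesis", "neural networks", "blockchain"]),
    ("partially_correct_mechanism", ["converting energy", "pattern matching", "distributed consensus"]),
    ("recent_event", ["recent elections", "current conflicts", "ongoing negotiations"]),
    ("unreleased_product", ["upcoming smartphone", "beta software"]),
    ("complex_process", ["quantum computing", "CRISPR gene editing"]),
    ("main_steps", ["initialization and processing", "targeting and modification"]),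
    ("variables", ["hardware configuration", "specific application"]),
    ("specific_aspect", ["error correction", "off-target effects"]),
    ("well_known_fact", ["the speed of light", "the Pythagorean theorem"]),
    ("accurate_description", ["approximately 299,792,458 m/s", "a² + b² = c² for right triangles"]),
    ("verification_method", ["extensive experimental measurement", "mathematical proof"]) ]

-- Source B's dict comprehension {"{"+name+"}": pool[index % len(pool)] for name, pool in pools}:
-- insertion-order association list produced by one map over the pools.
def ctTable (index : Int) : List (String × String) :=
  (ctPools index).map (fun np =>
    ("{" ++ np.1 ++ "}", PySem.List.pyGetD np.2 (PySem.Int.mod index (np.2.length : Int)) ""))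

-- The regex alternation `k1|k2|…|k18` of escaped literals: at a given position it matches the first
-- alternative (in table order) that is a (nonempty) literal prefix of the remaining text.
def ctFind (table : List (String × String)) (l : List Char) : Option (String × String) :=
  table.find? (fun p => !p.1.toList.isEmpty && p.1.toList.isPrefixOf l)

-- pattern.sub(lambda m: table[m.group(0)], template): one left-to-right scan; on a match emit the
-- table value and resume after the matched key, otherwise copy the character.  Exact for this
-- pattern: every alternative is a nonempty re.escape'd literal.
def ctScan (table : List (String × String)) (l : List Char) : List Char :=
  match h : ctFind table l with
  | some kv => kv.2.toList ++ ctScan table (List.drop kv.1.toList.length l)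
  | none =>
    match l with
    | [] => []
    | c :: rest => c :: ctScan table rest
termination_by l.length
decreasing_by
  · have hp := List.find?_some h
    simp only [Bool.and_eq_true, Bool.not_eq_true', List.isEmpty_eq_false_iff] at hp
    have hpre : kv.1.toList <+: l := List.isPrefixOf_iff_prefix.mp hp.2
    have hlen : kv.1.toList.length ≤ l.length := hpre.length_le
    have hne : kv.1.toList ≠ [] := hp.1
    have h1 : 1 ≤ kv.1.toList.length := List.length_pos_iff.mpr hne
    rw [List.length_drop]; omega
  · simp

def customize_template_alt (template : String) (topic : String) (index : Int) : String :=
  String.ofList (ctScan (ctTable index) template.toList)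

-- ===== PRECONDITION & SPEC =====
def Spec_customize_template (template : String) (topic : String) (index : Int) (out : String) : Prop := out = customize_template_alt template topic index
instance (template : String) (topic : String) (index : Int) (out : String) : Decidable (Spec_customize_template template topic index out) := by unfold Spec_customize_template; infer_instance

-- ===== CLAIM (what is proved, stated in full; the proofs are below) =====
def Claim_equal_customize_template : Prop := ∀ (template : String) (topic : String) (index : Int), Dom_customize_template template topic index → Spec_customize_template template topic index (customize_template template topic index)

-- ===== LEMMAS AND PROOFS =====

-- Proof-side restatement of A's association list (what A's foldl runs over).
def aList (index : Int) : List (String × String) :=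
  [ ("{country}", PySem.List.pyGetD ["France", "Germany", "Japan", "Brazil"] (PySem.Int.mod index 4) ""),
    ("{wrong_city}", PySem.List.pyGetD ["Lyon", "Munich", "Osaka", "São Paulo"] (PySem.Int.mod index 4) ""),
    ("{fake_year}", PySem.Int.toStr (1800 + PySem.Int.mod (index * 13) 200)),
    ("{technology}", PySem.List.pyGetD ["the transistor", "the laser", "the microprocessor"] (PySem.Int.mod index 3) ""),
    ("{fake_person}", PySem.List.pyGetD ["Dr. John Smith", "Professor Jane Doe"] (PySem.Int.mod index 2) ""),
    ("{wrong_year}", PySem.Int.toStr (1900 + PySem.Int.mod (index * 7) 100)),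
    ("{fake_institution}", PySem.List.pyGetD ["MIT", "Oxford University"] (PySem.Int.mod index 2) ""),
    ("{process}", PySem.List.pyGetD ["photosynthesis", "neural networks", "blockchain"] (PySem.Int.mod index 3) ""),
    ("{partially_correct_mechanism}", PySem.List.pyGetD ["converting energy", "pattern matching", "distributed consensus"] (PySem.Int.mod index 3) ""),
    ("{recent_event}", PySem.List.pyGetD ["recent elections", "current conflicts", "ongoing negotiations"] (PySem.Int.mod index 3) ""),
    ("{unreleased_product}", PySem.List.pyGetD ["upcoming smartphone", "beta software"] (PySem.Int.mod index 2) ""),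
    ("{complex_process}", PySem.List.pyGetD ["quantum computing", "CRISPR gene editing"] (PySem.Int.mod index 2) ""),
    ("{main_steps}", PySem.List.pyGetD ["initialization and processing", "targeting and modification"] (PySem.Int.mod index 2) ""),
    ("{variables}", PySem.List.pyGetD ["hardware configuration", "specific application"] (PySem.Int.mod index 2) ""),
    ("{specific_aspect}", PySem.List.pyGetD ["error correction", "off-target effects"] (PySem.Int.mod index 2) ""),
    ("{well_known_fact}", PySem.List.pyGetD ["the speed of light", "the Pythagorean theorem"] (PySem.Int.mod index 2) ""),
    ("{accurate_description}", PySem.List.pyGetD ["approximately 299,792,458 m/s", "a² + b² = c² for right triangles"] (PySem.Int.mod index 2) ""),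
    ("{verification_method}", PySem.List.pyGetD ["extensive experimental measurement", "mathematical proof"] (PySem.Int.mod index 2) "") ]

lemma singleton_pick (i : Int) (s : String) :
    PySem.List.pyGetD [s] (PySem.Int.mod i 1) "" = s := by
  simp [PySem.Int.mod, PySem.List.pyGetD]

lemma aList_eq_ctTable (index : Int) : aList index = ctTable index := by
  simp [aList, ctTable, ctPools, singleton_pick]

def rep (old new : List Char) (l : List Char) : List Char :=
  match l with
  | [] => []
  | c :: t =>
    if old.isPrefixOf (c :: t) && !old.isEmpty then
      new ++ rep old new (List.drop old.length (c :: t))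
    else c :: rep old new t
termination_by l.length
decreasing_by
  · rename_i h
    simp only [Bool.and_eq_true, Bool.not_eq_true', List.isEmpty_eq_false_iff] at h
    have h1 : 1 ≤ old.length := List.length_pos_iff.mpr h.2
    rw [List.length_drop]; simp; omega
  · simp

lemma repGo (old new : List Char) (hold : old ≠ []) :
    ∀ (fuel : Nat) (l acc : List Char), l.length ≤ fuel →
      PySem.Chars.replace.go old new fuel l acc = acc.reverse ++ rep old new l := by
  intro fuel
  induction fuel with
  | zero =>
    intro l acc hl
    have : l = [] := List.eq_nil_of_length_eq_zero (by omega)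
    subst this
    simp [PySem.Chars.replace.go, rep]
  | succ n ih =>
    intro l acc hl
    match l with
    | [] => simp [PySem.Chars.replace.go, rep]
    | c :: t =>
      rw [PySem.Chars.replace.go]
      by_cases hp : old.isPrefixOf (c :: t)
      · have h1 : 1 ≤ old.length := List.length_pos_iff.mpr hold
        rw [if_pos hp, ih _ _ (by simp at hl ⊢; omega)]
        rw [rep, if_pos (by simp [hp, hold])]
        simp
      · rw [if_neg hp, ih _ _ (by simp at hl ⊢; omega)]
        rw [rep, if_neg (by simp [hp])]
        simp

lemma replace_eq_rep (old new l : List Char) (hold : old ≠ []) :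
    PySem.Chars.replace l old new = rep old new l := by
  rw [PySem.Chars.replace, if_neg (by simp [hold]), repGo old new hold _ _ _ le_rfl]
  simp

lemma rep_eq_self_of_findGo (old new : List Char) (hold : old ≠ []) :
    ∀ (l : List Char) (n : Nat), PySem.Chars.find.go old l n = -1 → rep old new l = l := by
  intro l
  induction l with
  | nil => intro n _; rw [rep]
  | cons c t ih =>
    intro n hf
    rw [PySem.Chars.find.go] at hf
    by_cases hp : old.isPrefixOf (c :: t)
    · rw [if_pos hp] at hf; omega
    · rw [if_neg hp] at hf
      rw [rep, if_neg (by simp [hp])]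
      rw [ih _ hf]

lemma step_eq_rep (k v r : String) (hk : k.toList ≠ []) :
    (if PySem.Str.isIn k r then PySem.Str.replace r k v else r).toList
      = rep k.toList v.toList r.toList := by
  by_cases hin : PySem.Str.isIn k r
  · rw [if_pos hin, PySem.Str.replace]
    simp [replace_eq_rep _ _ _ hk]
  · rw [if_neg hin]
    rw [PySem.Str.isIn, PySem.Chars.isIn] at hin
    simp only [bne_iff_ne, ne_eq, Decidable.not_not, PySem.Chars.find] at hin
    rw [rep_eq_self_of_findGo _ v.toList hk _ _ hin]

lemma foldA_toList (items : List (String × String)) :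
    ∀ (s : String), (∀ p ∈ items, p.1.toList ≠ []) →
      (items.foldl (fun result p =>
        if PySem.Str.isIn p.1 result then PySem.Str.replace result p.1 p.2 else result) s).toList
      = items.foldl (fun l p => rep p.1.toList p.2.toList l) s.toList := by
  induction items with
  | nil => intro s _; rfl
  | cons e t ih =>
    intro s hne
    simp only [List.foldl_cons]
    rw [← step_eq_rep e.1 e.2 s (hne e (by simp))]
    exact ih _ (fun p hp => hne p (by simp [hp]))

lemma ctScan_some {t : List (String × String)} {l : List Char} {kv : String × String}
    (h : ctFind t l = some kv) :
    ctScan t l = kv.2.toList ++ ctScan t (List.drop kv.1.toList.length l) := by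
  rw [ctScan]; split
  · rename_i kv' h'; rw [h] at h'; injection h' with h'; subst h'; rfl
  · rename_i h'; rw [h] at h'; cases h'

lemma ctScan_none_cons {t : List (String × String)} {c : Char} {rest : List Char}
    (h : ctFind t (c :: rest) = none) :
    ctScan t (c :: rest) = c :: ctScan t rest := by
  rw [ctScan]; split
  · rename_i kv' h'; rw [h] at h'; cases h'
  · rfl

lemma ctScan_nil (t : List (String × String)) : ctScan t [] = [] := by
  rw [ctScan]; split
  · rename_i kv h
    have hp := List.find?_some h
    simp only [Bool.and_eq_true, Bool.not_eq_true', List.isEmpty_eq_false_iff] at hp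
    have h2 := List.isPrefixOf_iff_prefix.mp hp.2
    simp only [List.prefix_nil] at h2
    exact absurd h2 hp.1
  · rfl

lemma ctScan_empty : ∀ (l : List Char), ctScan [] l = l := by
  intro l
  induction l with
  | nil => exact ctScan_nil []
  | cons c t ih => rw [ctScan_none_cons (by rw [ctFind]; rfl), ih]

lemma ctFind_none_of_head_ne (t : List (String × String))
    (ht : ∀ p ∈ t, ∃ r, p.1.toList = '{' :: r) {c : Char} (hc : c ≠ '{') (rest : List Char) :
    ctFind t (c :: rest) = none := by
  rw [ctFind, List.find?_eq_none]
  intro p hp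
  obtain ⟨r, hr⟩ := ht p hp
  simp [hr, List.isPrefixOf, hc.symm]

lemma ctScan_cons_ne (t : List (String × String))
    (ht : ∀ p ∈ t, ∃ r, p.1.toList = '{' :: r) {c : Char} (hc : c ≠ '{') (rest : List Char) :
    ctScan t (c :: rest) = c :: ctScan t rest :=
  ctScan_none_cons (ctFind_none_of_head_ne t ht hc rest)

lemma ctScan_append_verbatim (t : List (String × String))
    (ht : ∀ p ∈ t, ∃ r, p.1.toList = '{' :: r) :
    ∀ (m rest : List Char), (∀ c ∈ m, c ≠ '{') → ctScan t (m ++ rest) = m ++ ctScan t rest := by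
  intro m
  induction m with
  | nil => intro rest _; simp
  | cons c m' ih =>
    intro rest hm
    rw [List.cons_append, ctScan_cons_ne t ht (hm c (by simp)), ih rest (fun d hd => hm d (by simp [hd]))]
    simp

lemma mem_rbrace_of_suffix {p body : List Char} (hs : p <:+ body ++ ['}']) (hne : p ≠ []) :
    '}' ∈ p := by
  obtain ⟨pre, hpre⟩ := hs
  have h1 : (pre ++ p).getLast? = p.getLast? := List.getLast?_append_of_ne_nil pre hne
  have h2 : p.getLast? = some '}' := by
    rw [← h1, hpre]; simp
  exact List.mem_of_getLast? h2

lemma infix_cons_of_infix {v l : List Char} (c : Char) (h : v <:+: l) : v <:+: c :: l := by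
  obtain ⟨s, t, hst⟩ := h
  exact ⟨c :: s, t, by simp [← hst]⟩

lemma infix_of_prefix_suffix {v p q : List Char} (h1 : v <+: p) (h2 : p <:+ q) : v <:+: q := by
  obtain ⟨rest, hrest⟩ := h1
  obtain ⟨pre, hpre⟩ := h2
  exact ⟨pre, rest, by rw [← hpre, ← hrest]; simp⟩

lemma scan_prefix_reflect (t : List (String × String)) (body : List Char)
    (ht : ∀ p ∈ t, ∃ r, p.1.toList = '{' :: r)
    (hv : ∀ p ∈ t, '}' ∉ p.2.toList ∧ ¬ p.2.toList <:+: ('{' :: body ++ ['}'])) :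
    ∀ (s' p : List Char), p ≠ [] → p <:+ body ++ ['}'] → p <+: ctScan t s' → p <+: s' := by
  intro s'
  induction s' with
  | nil =>
    intro p hne _ hp
    rw [ctScan_nil] at hp
    exact absurd (List.prefix_nil.mp hp) hne
  | cons c u ihu =>
    intro p hne hsuf hp
    cases hfind : ctFind t (c :: u) with
    | some kv =>
      exfalso
      rw [ctScan_some hfind] at hp
      have hkv : kv ∈ t := List.mem_of_find?_eq_some hfind
      have hvok := hv kv hkv
      by_cases hlen : p.length ≤ kv.2.toList.length
      · have hpv : p <+: kv.2.toList :=
          List.prefix_of_prefix_length_le hp (List.prefix_append _ _) hlen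
        exact hvok.1 (hpv.subset (mem_rbrace_of_suffix hsuf hne))
      · have hvp : kv.2.toList <+: p :=
          List.prefix_of_prefix_length_le (List.prefix_append _ _) hp (by omega)
        exact hvok.2 (infix_cons_of_infix '{' (infix_of_prefix_suffix hvp hsuf))
    | none =>
      rw [ctScan_none_cons hfind] at hp
      match p, hne with
      | d :: p', _ =>
        have hd : d = c := (List.cons_prefix_cons.mp hp).1
        have hp' : p' <+: ctScan t u := (List.cons_prefix_cons.mp hp).2
        subst hd
        by_cases hpe : p' = []
        · subst hpe; simp
        · have hsuf' : p' <:+ body ++ ['}'] := by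
            obtain ⟨pre, hpre⟩ := hsuf
            exact ⟨pre ++ [d], by simpa using hpre⟩
          exact List.cons_prefix_cons.mpr ⟨rfl, ihu p' hpe hsuf' hp'⟩

def KeyP (k : List Char) : Prop := ∃ body, k = '{' :: body ++ ['}'] ∧ '{' ∉ body

lemma keyP_head {k : List Char} (h : KeyP k) : ∃ r, k = '{' :: r := by
  obtain ⟨body, hb, _⟩ := h; exact ⟨body ++ ['}'], hb⟩

lemma rep_append_left {k v pre X : List Char} (hk : ∃ k', k = '{' :: k') (hpre : '{' ∉ pre) :
    rep k v (pre ++ X) = pre ++ rep k v X := by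
  obtain ⟨k', hk'⟩ := hk
  induction pre with
  | nil => simp
  | cons c pre' ih =>
    have hc : c ≠ '{' := fun h => hpre (by simp [h])
    rw [List.cons_append, rep, if_neg (by simp [hk', List.isPrefixOf, hc.symm]),
      ih (fun h => hpre (by simp [h]))]
    simp

lemma ctFind_append_none {t : List (String × String)} {l : List Char} (k v : String)
    (h : ctFind t l = none) :
    ctFind (t ++ [(k, v)]) l
      = if (!k.toList.isEmpty && k.toList.isPrefixOf l) then some (k, v) else none := by
  rw [ctFind, List.find?_append]
  rw [ctFind] at h
  rw [h]
  cases hcond : (!k.toList.isEmpty && k.toList.isPrefixOf l) <;> simp [List.find?, hcond]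

lemma rep_head (k v X : List Char) (hk : k ≠ []) : rep k v (k ++ X) = v ++ rep k v X := by
  match k, hk with
  | a :: k', _ =>
    rw [List.cons_append, rep,
      if_pos (by simp only [Bool.and_eq_true, Bool.not_eq_true', List.isEmpty_eq_false_iff]
                 exact ⟨List.isPrefixOf_iff_prefix.mpr ⟨X, by simp⟩, by simp⟩)]
    simp [List.drop_left]

lemma bigL (t : List (String × String)) (k v : String)
    (hkeys : ∀ p ∈ t, KeyP p.1.toList)
    (hvals : ∀ p ∈ t, p.2.toList ≠ [] ∧ '{' ∉ p.2.toList ∧ '}' ∉ p.2.toList ∧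
      ¬ p.2.toList <:+: k.toList)
    (hk : KeyP k.toList) :
    ∀ (n : Nat) (s : List Char), s.length ≤ n →
      rep k.toList v.toList (ctScan t s) = ctScan (t ++ [(k, v)]) s := by
  obtain ⟨body, hbody, hbodyfree⟩ := hk
  have ht : ∀ p ∈ t, ∃ r, p.1.toList = '{' :: r := fun p hp => keyP_head (hkeys p hp)
  intro n
  induction n with
  | zero =>
    intro s hs
    have : s = [] := List.eq_nil_of_length_eq_zero (by omega)
    subst this
    rw [ctScan_nil, ctScan_nil, rep]
  | succ n ih =>
    intro s hs
    match s with
    | [] => rw [ctScan_nil, ctScan_nil, rep]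
    | c :: u₀ =>
      cases hfind : ctFind t (c :: u₀) with
      | some kv =>
        have hkv : kv ∈ t := List.mem_of_find?_eq_some hfind
        have hp := List.find?_some hfind
        simp only [Bool.and_eq_true, Bool.not_eq_true', List.isEmpty_eq_false_iff] at hp
        have hlen1 : 1 ≤ kv.1.toList.length := List.length_pos_iff.mpr hp.1
        have hfind2 : ctFind (t ++ [(k, v)]) (c :: u₀) = some kv := by
          rw [ctFind, List.find?_append]
          rw [ctFind] at hfind
          rw [hfind]; rfl
        rw [ctScan_some hfind, ctScan_some hfind2,
          rep_append_left (keyP_head ⟨body, hbody, hbodyfree⟩) (hvals kv hkv).2.1]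
        congr 1
        apply ih
        rw [List.length_drop]
        simp only [List.length_cons] at hs ⊢
        omega
      | none =>
        have hkne : k.toList ≠ [] := by rw [hbody]; simp
        by_cases hpre : k.toList.isPrefixOf (c :: u₀)
        · obtain ⟨u, hu⟩ := List.isPrefixOf_iff_prefix.mp hpre
          have hulen : u.length + k.toList.length = u₀.length + 1 := by
            have := congrArg List.length hu
            simp only [List.length_append, List.length_cons] at this; omega
          have hfindu : ctFind t ('{' :: ((body ++ ['}']) ++ u)) = none := by
            have h0 := hfind
            rw [← hu, hbody, List.cons_append] at h0
            exact h0
          have hmchars : ∀ d ∈ body ++ ['}'], d ≠ '{' := by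
            intro d hd
            simp at hd
            rcases hd with hd | hd
            · exact fun hh => hbodyfree (hh ▸ hd)
            · simp [hd]
          have hscan : ctScan t (c :: u₀) = k.toList ++ ctScan t u := by
            calc ctScan t (c :: u₀)
                = ctScan t ('{' :: ((body ++ ['}']) ++ u)) := by
                  rw [← hu, hbody]; rfl
              _ = '{' :: ctScan t ((body ++ ['}']) ++ u) := ctScan_none_cons hfindu
              _ = '{' :: ((body ++ ['}']) ++ ctScan t u) := by
                  rw [ctScan_append_verbatim t ht (body ++ ['}']) u hmchars]
              _ = k.toList ++ ctScan t u := by rw [hbody]; simp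
          have hfind2 : ctFind (t ++ [(k, v)]) (c :: u₀) = some (k, v) := by
            rw [ctFind_append_none k v hfind, if_pos (by simp [hpre, hkne])]
          rw [hscan, rep_head _ _ _ hkne, ctScan_some hfind2]
          congr 1
          have hdrop : List.drop (k.toList.length) (c :: u₀) = u := by
            rw [← hu, List.drop_left]
          rw [hdrop]
          apply ih
          simp only [List.length_cons] at hs
          have h1 : 1 ≤ k.toList.length := List.length_pos_iff.mpr hkne
          omega
        · have hfind2 : ctFind (t ++ [(k, v)]) (c :: u₀) = none := by
            rw [ctFind_append_none k v hfind, if_neg (by simp [hpre])]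
          rw [ctScan_none_cons hfind, ctScan_none_cons hfind2]
          have hguard : ¬ k.toList.isPrefixOf (c :: ctScan t u₀) = true := by
            intro habs
            apply hpre
            have habs' := List.isPrefixOf_iff_prefix.mp habs
            rw [hbody] at habs'
            have hc : '{' = c := (List.cons_prefix_cons.mp habs').1
            have htail : body ++ ['}'] <+: ctScan t u₀ := (List.cons_prefix_cons.mp habs').2
            have hrefl := scan_prefix_reflect t body ht
              (fun p hp => ⟨(hvals p hp).2.2.1, by
                have := (hvals p hp).2.2.2
                rw [hbody] at this
                exact this⟩)
              u₀ (body ++ ['}']) (by simp) List.suffix_rfl htail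
            apply List.isPrefixOf_iff_prefix.mpr
            rw [hbody, ← hc]
            exact List.cons_prefix_cons.mpr ⟨rfl, hrefl⟩
          rw [rep, if_neg (by simp only [Bool.and_eq_true]; intro h; exact hguard h.1)]
          congr 1
          apply ih
          simp only [List.length_cons] at hs
          omega

theorem mainScan (table : List (String × String))
    (hG : ∀ p ∈ table, KeyP p.1.toList ∧ p.2.toList ≠ [] ∧ '{' ∉ p.2.toList ∧ '}' ∉ p.2.toList ∧
      ∀ q ∈ table, ¬ p.2.toList <:+: q.1.toList) :
    ∀ s : List Char,
      table.foldl (fun l p => rep p.1.toList p.2.toList l) s = ctScan table s := by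
  induction table using List.reverseRecOn with
  | nil => intro s; simp [ctScan_empty]
  | append_singleton t₀ e ih =>
    intro s
    rw [List.foldl_append]
    simp only [List.foldl_cons, List.foldl_nil]
    rw [ih (fun p hp => by
      obtain ⟨h1, h2, h3, h4, h5⟩ := hG p (by simp [hp])
      exact ⟨h1, h2, h3, h4, fun q hq => h5 q (by simp [hq])⟩) s]
    have := bigL t₀ e.1 e.2
      (fun p hp => (hG p (by simp [hp])).1)
      (fun p hp => by
        obtain ⟨h1, h2, h3, h4, h5⟩ := hG p (by simp [hp])
        exact ⟨h2, h3, h4, h5 e (by simp)⟩)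
      (hG e (by simp)).1
      s.length s le_rfl
    simpa using this

def ctKeys : List (List Char) :=
  ["{country}".toList, "{wrong_city}".toList, "{fake_year}".toList, "{technology}".toList,
   "{fake_person}".toList, "{wrong_year}".toList, "{fake_institution}".toList, "{process}".toList,
   "{partially_correct_mechanism}".toList, "{recent_event}".toList, "{unreleased_product}".toList,
   "{complex_process}".toList, "{main_steps}".toList, "{variables}".toList,
   "{specific_aspect}".toList, "{well_known_fact}".toList, "{accurate_description}".toList,
   "{verification_method}".toList]

def VOK (v : List Char) : Prop := v ≠ [] ∧ '{' ∉ v ∧ '}' ∉ v ∧ ∀ kk ∈ ctKeys, ¬ v <:+: kk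

lemma keyP_of_shape (k : List Char)
    (h : (k.head? == some '{' && (k.getLast? == some '}') && decide (2 ≤ k.length) &&
      !(k.tail.dropLast.contains '{')) = true) : KeyP k := by
  simp only [Bool.and_eq_true, beq_iff_eq, decide_eq_true_eq, Bool.not_eq_true'] at h
  obtain ⟨⟨⟨h1, h2⟩, h3⟩, h4⟩ := h
  match k with
  | [] => simp at h1
  | c :: rest =>
    have hc : c = '{' := by simpa using h1
    subst hc
    have hrne : rest ≠ [] := by
      intro hx; subst hx; simp at h3
    refine ⟨rest.dropLast, ?_, ?_⟩
    · have hgl : rest.getLast hrne = '}' := by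
        have h2' : rest.getLast? = some '}' := by
          rw [← h2, List.getLast?_cons, List.getLast?_eq_head?_reverse]
          cases hrev : rest.reverse with
          | nil => exact absurd (by simpa using hrev) hrne
          | cons a l => simp
        rw [List.getLast?_eq_some_getLast hrne] at h2'
        simpa using h2'
      have : rest.dropLast ++ ['}'] = rest := by
        conv_rhs => rw [← List.dropLast_append_getLast hrne]
        rw [hgl]
      rw [← this]
      simp
    · intro hmem
      rw [List.contains_eq_mem] at h4
      simp only [decide_eq_false_iff_not] at h4
      exact h4 (by simpa using hmem)

lemma toDigitsCore_digits :
    ∀ (fuel n : Nat) (acc : List Char), (∀ c ∈ acc, c.isDigit = true) →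
      ∀ c ∈ Nat.toDigitsCore 10 fuel n acc, c.isDigit = true := by
  have hdc : ∀ m : Nat, m < 10 → (Nat.digitChar m).isDigit = true := by decide
  intro fuel
  induction fuel with
  | zero => intro n acc hacc; rw [Nat.toDigitsCore]; exact hacc
  | succ f ih =>
    intro n acc hacc
    rw [Nat.toDigitsCore]
    have hd := hdc (n % 10) (Nat.mod_lt _ (by norm_num))
    by_cases hz : n / 10 = 0
    · rw [if_pos hz]
      intro c hc
      rcases List.mem_cons.mp hc with hc | hc
      · exact hc ▸ hd
      · exact hacc c hc
    · rw [if_neg hz]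
      exact ih _ _ (fun c hc => by
        rcases List.mem_cons.mp hc with hc | hc
        · exact hc ▸ hd
        · exact hacc c hc)

lemma toDigitsCore_length_ge :
    ∀ (fuel n : Nat) (acc : List Char), acc.length ≤ (Nat.toDigitsCore 10 fuel n acc).length := by
  intro fuel
  induction fuel with
  | zero => intro n acc; rw [Nat.toDigitsCore]
  | succ f ih =>
    intro n acc
    rw [Nat.toDigitsCore]
    by_cases hz : n / 10 = 0
    · rw [if_pos hz]; simp
    · rw [if_neg hz]
      calc acc.length ≤ (('{' :: acc).length) := by simp
        _ = ((n % 10).digitChar :: acc).length := by simp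
        _ ≤ _ := ih _ _

lemma toChars_digits (n : Int) (hn : 0 ≤ n) :
    PySem.Int.toChars n ≠ [] ∧ ∀ c ∈ PySem.Int.toChars n, c.isDigit = true := by
  rw [PySem.Int.toChars, if_neg (by omega)]
  constructor
  · rw [Nat.toDigits, Nat.toDigitsCore]
    by_cases hz : n.toNat / 10 = 0
    · rw [if_pos hz]; simp
    · rw [if_neg hz]
      intro habs
      have := toDigitsCore_length_ge (n.toNat) (n.toNat / 10) [(n.toNat % 10).digitChar]
      rw [habs] at this
      simp at this
  · exact toDigitsCore_digits _ _ [] (by simp)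

set_option maxRecDepth 8192 in
lemma vok_digits (v : List Char) (hne : v ≠ []) (hd : ∀ c ∈ v, c.isDigit = true) : VOK v := by
  have hkeysndB : ctKeys.all (fun kk => kk.all (fun c => !c.isDigit)) = true := by decide
  have hkeysnd : ∀ kk ∈ ctKeys, ∀ c ∈ kk, c.isDigit = false := by
    intro kk hkk c hc
    have h1 := List.all_eq_true.mp hkeysndB kk hkk
    have h2 := List.all_eq_true.mp h1 c hc
    simpa using h2
  refine ⟨hne, ?_, ?_, ?_⟩
  · intro habs; have := hd _ habs; simp [Char.isDigit] at this
  · intro habs; have := hd _ habs; simp [Char.isDigit] at this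
  · intro kk hkk habs
    match v, hne with
    | d :: v', _ =>
      have hdmem : d ∈ kk := habs.subset (by simp)
      have h1 := hd d (by simp)
      have h2 := hkeysnd kk hkk d hdmem
      rw [h1] at h2; cases h2

lemma vok_year (a : Int) (base : Int) (b : Int) (hb : 0 < b) (hbase : 0 ≤ base) :
    VOK (PySem.Int.toStr (base + PySem.Int.mod a b)).toList := by
  rw [PySem.Int.toList_toStr]
  have h0 := PySem.Int.mod_nonneg a hb
  obtain ⟨h1, h2⟩ := toChars_digits (base + PySem.Int.mod a b) (by omega)
  exact vok_digits _ h1 h2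

lemma vok_pick (opts : List String) (hall : ∀ o ∈ opts, VOK o.toList)
    (a b : Int) (hb : 0 < b) (hlen : (opts.length : Int) = b) :
    VOK (PySem.List.pyGetD opts (PySem.Int.mod a b) "").toList := by
  have h0 := PySem.Int.mod_nonneg a hb
  have h1 := PySem.Int.mod_lt a hb
  rw [PySem.List.pyGetD_eq_getElem opts "" h0 (by omega)]
  exact hall _ (List.getElem_mem _)

set_option maxRecDepth 8192 in
lemma keyP_all : ∀ kk ∈ ctKeys, KeyP kk := by
  intro kk h
  fin_cases h <;> exact keyP_of_shape _ (by decide)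

set_option maxRecDepth 8192 in
lemma hallCountry : ∀ o ∈ (["France", "Germany", "Japan", "Brazil"] : List String), VOK o.toList := by
  intro o ho
  unfold VOK
  fin_cases ho <;> exact ⟨by decide, by decide, by decide, by decide⟩

set_option maxRecDepth 8192 in
lemma hallCity : ∀ o ∈ (["Lyon", "Munich", "Osaka", "São Paulo"] : List String), VOK o.toList := by
  intro o ho
  unfold VOK
  fin_cases ho <;> exact ⟨by decide, by decide, by decide, by decide⟩

set_option maxRecDepth 8192 in
lemma hallTech : ∀ o ∈ (["the transistor", "the laser", "the microprocessor"] : List String), VOK o.toList := by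
  intro o ho
  unfold VOK
  fin_cases ho <;> exact ⟨by decide, by decide, by decide, by decide⟩

set_option maxRecDepth 8192 in
lemma hallPerson : ∀ o ∈ (["Dr. John Smith", "Professor Jane Doe"] : List String), VOK o.toList := by
  intro o ho
  unfold VOK
  fin_cases ho <;> exact ⟨by decide, by decide, by decide, by decide⟩

set_option maxRecDepth 8192 in
lemma hallInst : ∀ o ∈ (["MIT", "Oxford University"] : List String), VOK o.toList := by
  intro o ho
  unfold VOK
  fin_cases ho <;> exact ⟨by decide, by decide, by decide, by decide⟩

set_option maxRecDepth 8192 in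
lemma hallProc : ∀ o ∈ (["photosynthesis", "neural networks", "blockchain"] : List String), VOK o.toList := by
  intro o ho
  unfold VOK
  fin_cases ho <;> exact ⟨by decide, by decide, by decide, by decide⟩

set_option maxRecDepth 8192 in
lemma hallMech : ∀ o ∈ (["converting energy", "pattern matching", "distributed consensus"] : List String), VOK o.toList := by
  intro o ho
  unfold VOK
  fin_cases ho <;> exact ⟨by decide, by decide, by decide, by decide⟩

set_option maxRecDepth 8192 in
lemma hallEvent : ∀ o ∈ (["recent elections", "current conflicts", "ongoing negotiations"] : List String), VOK o.toList := by
  intro o ho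
  unfold VOK
  fin_cases ho <;> exact ⟨by decide, by decide, by decide, by decide⟩

set_option maxRecDepth 8192 in
lemma hallProd : ∀ o ∈ (["upcoming smartphone", "beta software"] : List String), VOK o.toList := by
  intro o ho
  unfold VOK
  fin_cases ho <;> exact ⟨by decide, by decide, by decide, by decide⟩

set_option maxRecDepth 8192 in
lemma hallComplex : ∀ o ∈ (["quantum computing", "CRISPR gene editing"] : List String), VOK o.toList := by
  intro o ho
  unfold VOK
  fin_cases ho <;> exact ⟨by decide, by decide, by decide, by decide⟩

set_option maxRecDepth 8192 in
lemma hallSteps : ∀ o ∈ (["initialization and processing", "targeting and modification"] : List String), VOK o.toList := by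
  intro o ho
  unfold VOK
  fin_cases ho <;> exact ⟨by decide, by decide, by decide, by decide⟩

set_option maxRecDepth 8192 in
lemma hallVars : ∀ o ∈ (["hardware configuration", "specific application"] : List String), VOK o.toList := by
  intro o ho
  unfold VOK
  fin_cases ho <;> exact ⟨by decide, by decide, by decide, by decide⟩

set_option maxRecDepth 8192 in
lemma hallAspect : ∀ o ∈ (["error correction", "off-target effects"] : List String), VOK o.toList := by
  intro o ho
  unfold VOK
  fin_cases ho <;> exact ⟨by decide, by decide, by decide, by decide⟩

set_option maxRecDepth 8192 in
lemma hallFact : ∀ o ∈ (["the speed of light", "the Pythagorean theorem"] : List String), VOK o.toList := by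
  intro o ho
  unfold VOK
  fin_cases ho <;> exact ⟨by decide, by decide, by decide, by decide⟩

set_option maxRecDepth 8192 in
lemma hallDesc : ∀ o ∈ (["approximately 299,792,458 m/s", "a² + b² = c² for right triangles"] : List String), VOK o.toList := by
  intro o ho
  unfold VOK
  fin_cases ho <;> exact ⟨by decide, by decide, by decide, by decide⟩

set_option maxRecDepth 8192 in
lemma hallVerif : ∀ o ∈ (["extensive experimental measurement", "mathematical proof"] : List String), VOK o.toList := by
  intro o ho
  unfold VOK
  fin_cases ho <;> exact ⟨by decide, by decide, by decide, by decide⟩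

set_option maxRecDepth 8192 in
set_option maxHeartbeats 1000000 in
lemma hKV (index : Int) : ∀ p ∈ ctTable index, p.1.toList ∈ ctKeys ∧ VOK p.2.toList := by
  intro p hp
  rw [← aList_eq_ctTable] at hp
  simp only [aList, List.mem_cons, List.not_mem_nil, or_false] at hp
  rcases hp with hp|hp|hp|hp|hp|hp|hp|hp|hp|hp|hp|hp|hp|hp|hp|hp|hp|hp <;> subst hp
  · exact ⟨by simp [ctKeys], vok_pick _ hallCountry _ _ (by norm_num) (by norm_num)⟩
  · exact ⟨by simp [ctKeys], vok_pick _ hallCity _ _ (by norm_num) (by norm_num)⟩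
  · exact ⟨by simp [ctKeys], vok_year _ _ _ (by norm_num) (by norm_num)⟩
  · exact ⟨by simp [ctKeys], vok_pick _ hallTech _ _ (by norm_num) (by norm_num)⟩
  · exact ⟨by simp [ctKeys], vok_pick _ hallPerson _ _ (by norm_num) (by norm_num)⟩
  · exact ⟨by simp [ctKeys], vok_year _ _ _ (by norm_num) (by norm_num)⟩
  · exact ⟨by simp [ctKeys], vok_pick _ hallInst _ _ (by norm_num) (by norm_num)⟩
  · exact ⟨by simp [ctKeys], vok_pick _ hallProc _ _ (by norm_num) (by norm_num)⟩
  · exact ⟨by simp [ctKeys], vok_pick _ hallMech _ _ (by norm_num) (by norm_num)⟩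
  · exact ⟨by simp [ctKeys], vok_pick _ hallEvent _ _ (by norm_num) (by norm_num)⟩
  · exact ⟨by simp [ctKeys], vok_pick _ hallProd _ _ (by norm_num) (by norm_num)⟩
  · exact ⟨by simp [ctKeys], vok_pick _ hallComplex _ _ (by norm_num) (by norm_num)⟩
  · exact ⟨by simp [ctKeys], vok_pick _ hallSteps _ _ (by norm_num) (by norm_num)⟩
  · exact ⟨by simp [ctKeys], vok_pick _ hallVars _ _ (by norm_num) (by norm_num)⟩
  · exact ⟨by simp [ctKeys], vok_pick _ hallAspect _ _ (by norm_num) (by norm_num)⟩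
  · exact ⟨by simp [ctKeys], vok_pick _ hallFact _ _ (by norm_num) (by norm_num)⟩
  · exact ⟨by simp [ctKeys], vok_pick _ hallDesc _ _ (by norm_num) (by norm_num)⟩
  · exact ⟨by simp [ctKeys], vok_pick _ hallVerif _ _ (by norm_num) (by norm_num)⟩

lemma hG_ctTable (index : Int) : ∀ p ∈ ctTable index,
    KeyP p.1.toList ∧ p.2.toList ≠ [] ∧ '{' ∉ p.2.toList ∧ '}' ∉ p.2.toList ∧
      ∀ q ∈ ctTable index, ¬ p.2.toList <:+: q.1.toList := by
  intro p hp
  obtain ⟨hk, hv⟩ := hKV index p hp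
  exact ⟨keyP_all _ hk, hv.1, hv.2.1, hv.2.2.1, fun q hq => hv.2.2.2 _ (hKV index q hq).1⟩

lemma hA_foldl (template topic : String) (index : Int) :
    customize_template template topic index
      = (aList index).foldl
          (fun result p =>
            if PySem.Str.isIn p.1 result then PySem.Str.replace result p.1 p.2 else result)
          template := rfl

theorem equivMain (template topic : String) (index : Int) :
    customize_template template topic index = customize_template_alt template topic index := by
  have hkeysne : ∀ p ∈ ctTable index, p.1.toList ≠ [] := by
    intro p hp
    obtain ⟨body, hb, _⟩ := keyP_all _ (hKV index p hp).1
    rw [hb]; simp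
  have hlist : (customize_template template topic index).toList
      = (customize_template_alt template topic index).toList := by
    rw [hA_foldl template topic index, aList_eq_ctTable, foldA_toList _ _ hkeysne,
      mainScan (ctTable index) (hG_ctTable index) template.toList]
    simp [customize_template_alt]
  calc customize_template template topic index
      = String.ofList (customize_template template topic index).toList := String.ofList_toList.symm
    _ = String.ofList (customize_template_alt template topic index).toList := by rw [hlist]
    _ = customize_template_alt template topic index := String.ofList_toList

-- ===== VERDICT (by name: the statement is the Claim_ definition above) =====
theorem customize_template_spec : Claim_equal_customize_template := by
  intro template topic index _
  unfold Spec_customize_template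
  exact equivMain template topic index
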